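-- pv_equiv track=rewrite | github.com/Raha-R8/Threes_game | part5.py | down_change
-- ===== SOURCE A (Python) =====
-- n = 4
--
-- def right_change(mat):
--     mat2 =[]
--     for list1 in mat:
--         list1 = [int(x) for x in list1]
--         list1 = list1[::-1]
--         for i in range(len(list1)-1):
--             if list1[i]==0:
--                 list1[i+1],list1[i]=list1[i],list1[i+1]
--             else:
--                 if (list1[i]==1 and list1[i+1]==2) or (list1[i]==2 and list1[i+1]==1):
--                     list1[i] = 3
--                     list1[i+1] = 0
--                 else:
--                     if list1[i] == list1[i+1] and list1[i]!=1 and list1[i]!=2: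
--                         list1[i]= 2*list1[i]
--                         list1[i+1] = 0
--         list1 = list1[::-1]
--         mat2+=[list1]
--     return mat2
--
-- def down_change(mat,n1=n):
--     mat2 =[]
--     j = 0
--     while j<n1:
--         ls =[]
--         for i in range(n1):
--             ls+=[mat[i][j]]
--             ls = [int(x) for x in ls]
--         mat2+=[ls]
--         j+=1
--     mat3 = right_change(mat2)
--     mat4 =[]
--     j = 0
--     while j<n1:
--         ls =[]
--         for i in range(n1):
--             ls+=[mat3[i][j]]
--             ls = [int(x) for x in ls]
--         mat4+=[ls]
--         j+=1
--     return mat4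
-- ===== SOURCE B (Python) =====
-- def down_change(mat, n1=4):
--     # Per column: find the LOWEST mergeable adjacent pair and do ONE splice
--     # (merged cell = sum of the pair; everything above shifts down; 0 enters at the top),
--     # instead of sweeping the whole column pairwise with swaps.
--     def fixed(c):
--         for k in range(n1 - 1, 0, -1):
--             a, b = c[k], c[k - 1]
--             if a == 0 or (a == 1 and b == 2) or (a == 2 and b == 1) or (a == b and a != 1 and a != 2):
--                 return [0] + c[:k - 1] + [a + b] + c[k + 1:]
--         return c
--     cols = [fixed([int(mat[i][j]) for i in range(n1)]) for j in range(n1)]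
--     return [[cols[j][i] for j in range(n1)] for i in range(n1)]
-- ===== Notes on version B (the rewrite author's own statement) =====
-- stated objective: alternative
-- what changed: A sweeps every column pairwise bottom-up (via transpose + reverse + an in-place swap/merge pass + reverse + transpose); B instead uses the fact that the pass performs at most one event per column: it searches each column for the LOWEST mergeable adjacent pair (merged value is always the pair's sum) and rebuilds the column with a single splice [0] + above-part + sum + below-part, no in-place sweep, no reversals and no transposed matrices.
import Mathlib
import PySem

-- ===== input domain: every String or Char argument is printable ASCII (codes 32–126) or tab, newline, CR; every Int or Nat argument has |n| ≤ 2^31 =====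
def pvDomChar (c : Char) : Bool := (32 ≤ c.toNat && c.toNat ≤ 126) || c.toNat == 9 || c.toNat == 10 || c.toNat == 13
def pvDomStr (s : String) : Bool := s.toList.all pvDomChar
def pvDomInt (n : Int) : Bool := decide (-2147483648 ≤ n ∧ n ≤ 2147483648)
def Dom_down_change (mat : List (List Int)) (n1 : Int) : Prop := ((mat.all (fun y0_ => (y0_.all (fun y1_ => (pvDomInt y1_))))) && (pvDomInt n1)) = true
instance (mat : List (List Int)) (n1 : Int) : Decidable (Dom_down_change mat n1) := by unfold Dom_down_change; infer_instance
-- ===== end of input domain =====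

-- B replaces A's transpose / reverse / in-place pairwise sweep pipeline by a per-column search
-- for the lowest mergeable adjacent pair followed by a single splice (objective: alternative).

-- ===== PORT A =====

-- [int(x) for x in ls] — int() is the identity on ints
def pvIntRow (ls : List Int) : List Int := ls.map (fun x => x)

-- the two 'while j < n1 / for i in range(n1): ls += [mat[i][j]]; ls = [int(x) for x in ls]' transpose loops;
-- mat[i][j] is ported as pyGetD (exact on Pre_, where both indices are in range)
def pvTranspose (m : List (List Int)) (n1 : Int) : List (List Int) :=
  (List.range n1.toNat).foldl
    (fun mat2 (j : Nat) =>
      mat2 ++ [(List.range n1.toNat).foldl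
        (fun ls (i : Nat) => pvIntRow (ls ++ [PySem.List.pyGetD (PySem.List.pyGetD m (i : Int) []) (j : Int) 0])) []])
    []

-- the 'for i in range(len(list1)-1)' single-pass merge of right_change (list1 already reversed)
def pvMerge (l : List Int) : List Int :=
  (List.range (l.length - 1)).foldl
    (fun ls (i : Nat) =>
      let a := PySem.List.pyGetD ls (i : Int) 0
      let b := PySem.List.pyGetD ls ((i : Int) + 1) 0
      if a = 0 then (ls.set (i + 1) a).set i b
      else if (a = 1 ∧ b = 2) ∨ (a = 2 ∧ b = 1) then (ls.set i 3).set (i + 1) 0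
      else if a = b ∧ a ≠ 1 ∧ a ≠ 2 then (ls.set i (2 * a)).set (i + 1) 0
      else ls)
    l

def pvRightChange (mat : List (List Int)) : List (List Int) :=
  mat.foldl (fun mat2 l => mat2 ++ [(pvMerge (pvIntRow l).reverse).reverse]) []

def down_change (mat : List (List Int)) (n1 : Int) : List (List Int) :=
  pvTranspose (pvRightChange (pvTranspose mat n1)) n1

-- ===== PORT B =====

-- the merge condition of Source B's 'if' (one boolean expression there)
def pvMergeableB (a b : Int) : Bool :=
  a == 0 || (a == 1 && b == 2) || (a == 2 && b == 1) || (a == b && a != 1 && a != 2)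

-- Source B's 'fixed': the 'for k in range(n1-1, 0, -1)' search with early return of the splice
-- '[0] + c[:k-1] + [a+b] + c[k+1:]' (slices ported with PySem.List.slice; c[k], c[k-1] via
-- pyGetD — exact here since every k produced by the range satisfies 1 ≤ k < len c)
def pvFixedGo (c : List Int) : List Int → List Int
  | [] => c
  | k :: ks =>
      let a := PySem.List.pyGetD c k 0
      let b := PySem.List.pyGetD c (k - 1) 0
      if pvMergeableB a b then
        0 :: (PySem.List.slice c none (some (k - 1)) ++ (a + b) :: PySem.List.slice c (some (k + 1)) none)
      else pvFixedGo c ks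

def pvFixed (n1 : Int) (c : List Int) : List Int :=
  pvFixedGo c (PySem.List.pyRange (n1 - 1) 0 (-1))

def down_change_alt (mat : List (List Int)) (n1 : Int) : List (List Int) :=
  let cols := (List.range n1.toNat).map
    (fun (j : Nat) => pvFixed n1
      ((List.range n1.toNat).map (fun (i : Nat) => PySem.List.pyGetD (PySem.List.pyGetD mat (i : Int) []) (j : Int) 0)))
  (List.range n1.toNat).map
    (fun (i : Nat) => (List.range n1.toNat).map (fun (j : Nat) => PySem.List.pyGetD (PySem.List.pyGetD cols (j : Int) []) (i : Int) 0))

-- ===== PRECONDITION & SPEC =====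
-- Pre_ excludes exactly the inputs where A raises IndexError: when 0 < n1, mat must have at
-- least n1 rows and each of the first n1 rows at least n1 entries.
def Pre_down_change (mat : List (List Int)) (n1 : Int) : Prop :=
  0 < n1 → (n1 ≤ (mat.length : Int) ∧ ∀ row ∈ mat.take n1.toNat, n1 ≤ (row.length : Int))
instance (mat : List (List Int)) (n1 : Int) : Decidable (Pre_down_change mat n1) := by
  unfold Pre_down_change; infer_instance

def pvWitness_down_change : List (List Int) × Int :=
  ([[1, 2, 0, 3], [3, 3, 0, 6], [0, 1, 2, 2], [2, 1, 6, 6]], 4)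

def Spec_down_change (mat : List (List Int)) (n1 : Int) (out : List (List Int)) : Prop := out = down_change_alt mat n1
instance (mat : List (List Int)) (n1 : Int) (out : List (List Int)) : Decidable (Spec_down_change mat n1 out) := by unfold Spec_down_change; infer_instance

-- ===== CLAIM (what is proved, stated in full; the proofs are below) =====
def Claim_equal_down_change : Prop := ∀ (mat : List (List Int)) (n1 : Int), Dom_down_change mat n1 → Pre_down_change mat n1 → Spec_down_change mat n1 (down_change mat n1)

-- ===== LEMMAS AND PROOFS =====

-- proof-only helpers: the A-side loop bodies and column reading, named
def pvColsOf (mat : List (List Int)) (k : Nat) (j : Nat) : List Int :=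
  (List.range k).map (fun (i : Nat) => PySem.List.pyGetD (PySem.List.pyGetD mat (i : Int) []) (j : Int) 0)

def pvMStep (ls : List Int) (i : Nat) : List Int :=
  let a := PySem.List.pyGetD ls (i : Int) 0
  let b := PySem.List.pyGetD ls ((i : Int) + 1) 0
  if a = 0 then (ls.set (i + 1) a).set i b
  else if (a = 1 ∧ b = 2) ∨ (a = 2 ∧ b = 1) then (ls.set i 3).set (i + 1) 0
  else if a = b ∧ a ≠ 1 ∧ a ≠ 2 then (ls.set i (2 * a)).set (i + 1) 0
  else ls

-- the merge condition read in a list, openwards (A's reversed row) and downwards (B's column)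
def pvP (l : List Int) (k : Nat) : Bool := pvMergeableB (l.getD k 0) (l.getD (k + 1) 0)
def pvQ (c : List Int) (k : Nat) : Bool := pvMergeableB (c.getD k 0) (c.getD (k - 1) 0)

theorem pvMerge_eq (l : List Int) : pvMerge l = (List.range (l.length - 1)).foldl pvMStep l := rfl

theorem pvIntRow_id (l : List Int) : pvIntRow l = l := by simp [pvIntRow]

theorem pvGetD_append_len (p : List Int) (z : Int) (t : List Int) :
    (p ++ z :: t).getD p.length 0 = z := by
  induction p with
  | nil => rfl
  | cons h tl ih => simp

theorem pvGetD_append_len1 (p : List Int) (z w : Int) (t : List Int) :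
    (p ++ z :: w :: t).getD (p.length + 1) 0 = w := by
  induction p with
  | nil => rfl
  | cons h tl ih => simp

theorem pvSet_append_len (p : List Int) (z : Int) (t : List Int) (v : Int) :
    (p ++ z :: t).set p.length v = p ++ v :: t := by
  induction p with
  | nil => rfl
  | cons h tl ih => simp

theorem pvSet_append_len1 (p : List Int) (z w : Int) (t : List Int) (v : Int) :
    (p ++ z :: w :: t).set (p.length + 1) v = p ++ z :: v :: t := by
  induction p with
  | nil => rfl
  | cons h tl ih => simp

theorem pvMStep_of_false (l : List Int) (k : Nat) (h : pvP l k = false) : pvMStep l k = l := by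
  unfold pvP at h
  unfold pvMStep
  have hcast : ((k : Int) + 1) = ((k + 1 : Nat) : Int) := by push_cast; ring
  simp only [hcast, PySem.List.pyGetD_natCast]
  generalize hA : l.getD k 0 = a at h ⊢
  generalize hB : l.getD (k + 1) 0 = b at h ⊢
  simp only [pvMergeableB, Bool.or_eq_false_iff, Bool.and_eq_false_iff, beq_eq_false_iff_ne,
    ne_eq, bne_eq_false_iff_eq] at h
  split_ifs with h1 h2 h3
  · exfalso; omega
  · exfalso; rcases h2 with ⟨ha, hb⟩ | ⟨ha, hb⟩ <;> omega
  · exfalso; obtain ⟨he, hn1, hn2⟩ := h3; omega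
  · rfl

theorem pvMStep_splice (p : List Int) (x y : Int) (q : List Int) :
    pvMStep (p ++ x :: y :: q) p.length
      = p ++ (if pvMergeableB x y then (x + y) :: 0 :: q else x :: y :: q) := by
  unfold pvMStep
  have hcast : ((p.length : Int) + 1) = ((p.length + 1 : Nat) : Int) := by push_cast; ring
  simp only [hcast, PySem.List.pyGetD_natCast, pvGetD_append_len, pvGetD_append_len1]
  by_cases hm : pvMergeableB x y = true
  · rw [if_pos hm]
    simp only [pvMergeableB, Bool.or_eq_true, Bool.and_eq_true, beq_iff_eq, bne_iff_ne] at hm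
    split_ifs with h1 h2 h3
    · subst h1; rw [pvSet_append_len1, pvSet_append_len]; norm_num
    · rw [pvSet_append_len, pvSet_append_len1]
      have : (3 : Int) = x + y := by rcases h2 with ⟨ha, hb⟩ | ⟨ha, hb⟩ <;> omega
      rw [← this]
    · rw [pvSet_append_len, pvSet_append_len1]
      have : 2 * x = x + y := by obtain ⟨he, -, -⟩ := h3; omega
      rw [← this]
    · exact absurd hm (by tauto)
  · rw [if_neg hm]
    simp only [pvMergeableB, Bool.or_eq_true, Bool.and_eq_true, beq_iff_eq, bne_iff_ne] at hm
    split_ifs with h1 h2 h3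
    · exact absurd h1 (by tauto)
    · exact absurd h2 (by tauto)
    · exact absurd h3 (by tauto)
    · rfl

theorem pvCascade : ∀ (q p : List Int),
    (List.range' p.length q.length).foldl pvMStep (p ++ 0 :: q) = p ++ q ++ [0] := by
  intro q
  induction q with
  | nil => intro p; simp
  | cons b q' ih =>
    intro p
    rw [show (b :: q').length = q'.length + 1 from rfl, List.range'_succ, List.foldl_cons]
    have h1 : pvMStep (p ++ 0 :: b :: q') p.length = p ++ b :: 0 :: q' := by
      rw [pvMStep_splice]
      simp [pvMergeableB]
    rw [h1, show p ++ b :: 0 :: q' = (p ++ [b]) ++ 0 :: q' by simp,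
        show p.length + 1 = (p ++ [b]).length by simp, ih (p ++ [b])]
    simp

theorem pvPrefixId : ∀ (t : Nat) (l : List Int), (∀ k, k < t → pvP l k = false) →
    (List.range t).foldl pvMStep l = l := by
  intro t
  induction t with
  | zero => intro l _; simp
  | succ t ih =>
    intro l h
    rw [List.range_succ, List.foldl_append, ih l (fun k hk => h k (by omega)), List.foldl_cons,
        List.foldl_nil, pvMStep_of_false l t (h t (by omega))]

theorem pvMerge_id (l : List Int) (h : ∀ k, k + 1 < l.length → pvP l k = false) :
    pvMerge l = l := by
  rw [pvMerge_eq]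
  exact pvPrefixId (l.length - 1) l (fun k hk => h k (by omega))

theorem pvMerge_splice (p : List Int) (x y : Int) (q : List Int)
    (hpre : ∀ k, k < p.length → pvP (p ++ x :: y :: q) k = false)
    (hxy : pvMergeableB x y = true) :
    pvMerge (p ++ x :: y :: q) = p ++ (x + y) :: q ++ [0] := by
  rw [pvMerge_eq]
  have hlen : (p ++ x :: y :: q).length - 1 = p.length + (1 + q.length) := by simp; omega
  rw [hlen, List.range_eq_range',
      show List.range' 0 (p.length + (1 + q.length))
        = List.range' 0 p.length ++ List.range' (0 + 1 * p.length) (1 + q.length) from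
        (List.range'_append (s := 0) (m := p.length) (n := 1 + q.length) (step := 1)).symm]
  rw [List.foldl_append, show (0 : Nat) + 1 * p.length = p.length by omega]
  rw [show List.range' 0 p.length = List.range p.length from List.range_eq_range'.symm]
  rw [pvPrefixId p.length _ hpre]
  rw [show 1 + q.length = q.length + 1 by omega, List.range'_succ, List.foldl_cons]
  rw [pvMStep_splice, if_pos hxy]
  rw [show p ++ (x + y) :: 0 :: q = (p ++ [x + y]) ++ 0 :: q by simp,
      show p.length + 1 = (p ++ [x + y]).length by simp, pvCascade q (p ++ [x + y])]
  simp

theorem pvP_reverse (c : List Int) (k' : Nat) (h : k' + 1 < c.length) :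
    pvP c.reverse k' = pvQ c (c.length - 1 - k') := by
  unfold pvP pvQ
  have h1 : c.reverse.getD k' 0 = c.getD (c.length - 1 - k') 0 := by
    rw [List.getD_eq_getElem _ _ (by simp; omega), List.getD_eq_getElem _ _ (by omega),
        List.getElem_reverse]
  have h2 : c.reverse.getD (k' + 1) 0 = c.getD (c.length - 1 - k' - 1) 0 := by
    rw [List.getD_eq_getElem _ _ (by simp; omega), List.getD_eq_getElem _ _ (by omega),
        List.getElem_reverse]
    congr 1
  rw [h1, h2]

theorem pvDescend (c : List Int) : ∀ (k : Nat), k < c.length →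
    (∀ j : Nat, k < j → j < c.length → pvQ c j = false) →
    pvFixedGo c (PySem.List.pyRange (k : Int) 0 (-1)) = (pvMerge c.reverse).reverse := by
  intro k
  induction k with
  | zero =>
    intro _ hj
    rw [show ((0 : Nat) : Int) = 0 by norm_num, PySem.List.pyRange_neg_one_eq_nil (by norm_num)]
    show c = (pvMerge c.reverse).reverse
    rw [pvMerge_id c.reverse (fun k'' hk'' => by
      rw [pvP_reverse c k'' (by simpa using hk'')]
      have hlen : k'' + 1 < c.length := by simpa using hk''
      exact hj _ (by omega) (by omega))]
    simp
  | succ k ih =>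
    intro hk hj
    have hc1 : ((k + 1 : Nat) : Int) = (k : Int) + 1 := by push_cast; ring
    rw [hc1, PySem.List.pyRange_neg_one_cons (by omega)]
    simp only [pvFixedGo]
    rw [show ((k : Int) + 1 - 1) = ((k : Nat) : Int) by ring]
    rw [show ((k : Int) + 1 + 1) = ((k + 2 : Nat) : Int) by push_cast; ring]
    rw [show ((k : Int) + 1) = ((k + 1 : Nat) : Int) from hc1.symm]
    simp only [PySem.List.pyGetD_natCast]
    by_cases hq : pvQ c (k + 1) = true
    · rw [if_pos (show pvMergeableB (c.getD (k+1) 0) (c.getD k 0) = true from hq)]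
      rw [PySem.List.slice_to_natCast, PySem.List.slice_from_natCast]
      have hk1 : k + 1 < c.length := by omega
      have hkk : k < c.length := by omega
      have hcdec : c = c.take k ++ c.getD k 0 :: c.getD (k + 1) 0 :: c.drop (k + 2) := by
        conv_lhs => rw [← List.take_append_drop k c]
        congr 1
        rw [List.drop_eq_getElem_cons hkk, List.drop_eq_getElem_cons hk1,
            List.getD_eq_getElem _ _ hkk, List.getD_eq_getElem _ _ hk1]
      have hrev : c.reverse
          = (c.drop (k + 2)).reverse ++ c.getD (k + 1) 0 :: c.getD k 0 :: (c.take k).reverse := by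
        conv_lhs => rw [hcdec]
        simp
      have hplen : ((c.drop (k + 2)).reverse).length = c.length - (k + 2) := by simp
      have hpre : ∀ kk, kk < ((c.drop (k + 2)).reverse).length →
          pvP ((c.drop (k + 2)).reverse ++ c.getD (k + 1) 0 :: c.getD k 0 :: (c.take k).reverse) kk = false := by
        intro kk hkk2
        rw [hplen] at hkk2
        rw [← hrev, pvP_reverse c kk (by omega)]
        exact hj _ (by omega) (by omega)
      rw [hrev, pvMerge_splice _ _ _ _ hpre hq]
      simp
    · rw [if_neg (show ¬ pvMergeableB (c.getD (k+1) 0) (c.getD k 0) = true from hq)]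
      exact ih (by omega) (fun j h1 h2 => by
        rcases Nat.eq_or_lt_of_le (Nat.succ_le_of_lt h1) with he | hl
        · subst he; simpa using hq
        · exact hj j (by omega) h2)

theorem pvFixed_eq_merge (n1 : Int) (c : List Int) (h : c.length = n1.toNat) :
    pvFixed n1 c = (pvMerge c.reverse).reverse := by
  unfold pvFixed
  by_cases hn : n1 ≤ 1
  · rw [PySem.List.pyRange_neg_one_eq_nil (by omega)]
    show c = (pvMerge c.reverse).reverse
    rw [pvMerge_id c.reverse (fun k hk => by exfalso; simp at hk; omega)]
    simp
  · rw [show (n1 - 1) = ((c.length - 1 : Nat) : Int) by omega]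
    exact pvDescend c (c.length - 1) (by omega) (fun j h1 h2 => absurd h2 (by omega))

theorem pvTranspose_eq (m : List (List Int)) (n1 : Int) :
    pvTranspose m n1 = (List.range n1.toNat).map (fun j => pvColsOf m n1.toNat j) := by
  have hcol : ∀ j : Nat,
      (List.range n1.toNat).foldl
        (fun ls (i : Nat) => pvIntRow (ls ++ [PySem.List.pyGetD (PySem.List.pyGetD m (i : Int) []) (j : Int) 0])) []
      = pvColsOf m n1.toNat j := by
    intro j
    have hfun : (fun (ls : List Int) (i : Nat) =>
        pvIntRow (ls ++ [PySem.List.pyGetD (PySem.List.pyGetD m (i : Int) []) (j : Int) 0]))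
        = fun (ls : List Int) (i : Nat) => ls ++ [PySem.List.pyGetD (PySem.List.pyGetD m (i : Int) []) (j : Int) 0] := by
      funext ls i; exact pvIntRow_id _
    rw [hfun, PySem.List.foldl_append_singleton_eq_map]
    simp [pvColsOf]
  unfold pvTranspose
  simp only [hcol]
  rw [PySem.List.foldl_append_singleton_eq_map]
  simp

theorem pvRightChange_eq (m : List (List Int)) :
    pvRightChange m = m.map (fun l => (pvMerge l.reverse).reverse) := by
  unfold pvRightChange
  have hfun : (fun (mat2 : List (List Int)) (l : List Int) => mat2 ++ [(pvMerge (pvIntRow l).reverse).reverse])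
      = fun mat2 l => mat2 ++ [(pvMerge l.reverse).reverse] := by
    funext mat2 l; rw [pvIntRow_id]
  rw [hfun, PySem.List.foldl_append_singleton_eq_map]
  simp

theorem colsOf_length (mat : List (List Int)) (k j : Nat) : (pvColsOf mat k j).length = k := by
  simp [pvColsOf]

theorem down_change_main : ∀ (mat : List (List Int)) (n1 : Int),
    down_change mat n1 = down_change_alt mat n1 := by
  intro mat n1
  unfold down_change down_change_alt
  rw [pvTranspose_eq mat n1, pvRightChange_eq, pvTranspose_eq]
  simp only [List.map_map, Function.comp_def]
  have hcol : ∀ j : Nat, (List.range n1.toNat).map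
      (fun (i : Nat) => PySem.List.pyGetD (PySem.List.pyGetD mat (i : Int) []) (j : Int) 0)
      = pvColsOf mat n1.toNat j := fun j => rfl
  simp only [hcol]
  have hmerge : ∀ j : Nat, (pvMerge (pvColsOf mat n1.toNat j).reverse).reverse
      = pvFixed n1 (pvColsOf mat n1.toNat j) :=
    fun j => (pvFixed_eq_merge n1 _ (colsOf_length mat n1.toNat j)).symm
  simp only [hmerge]
  apply List.map_congr_left
  intro r hr
  unfold pvColsOf
  apply List.map_congr_left
  intro c hcm
  have hrk : r < n1.toNat := List.mem_range.mp hr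
  have hck : c < n1.toNat := List.mem_range.mp hcm
  rw [PySem.List.pyGetD_natCast, PySem.List.pyGetD_natCast,
      PySem.List.getD_map_range _ _ _ _ hck]

-- ===== VERDICT (by name: the statement is the Claim_ definition above) =====
theorem down_change_spec : Claim_equal_down_change := by
  intro mat n1 _ _
  exact down_change_main mat n1
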